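-- pv_equiv track=rewrite | github.com/MarkZakelj/text_to_audio_alignment | main_decode.py | merge_vocab_str
-- ===== SOURCE A (Python) =====
-- def min_segment(segments, size_function):
--     min_idx = 0
--     min_size = size_function(segments[0])
--     for i, seg in enumerate(segments):
--         size = size_function(seg)
--         if size < min_size:
--             min_idx = i
--             min_size = size
--     return segments[min_idx], min_idx
--
-- def merge_vocab_str(vocab_str, min_len=4):
--     left, right = -1, 1
--     tmp_segments = [e for e in vocab_str]
--     min_seg, min_idx = min_segment(tmp_segments, len)
--     while len(min_seg) < min_len and len(tmp_segments) > 1: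
--         if min_idx == 0:
--             direction = right
--         elif min_idx == len(tmp_segments) - 1:
--             direction = left
--         else:
--             left_size = len(tmp_segments[min_idx - 1])
--             right_size = len(tmp_segments[min_idx + 1])
--             if left_size < right_size:
--                 direction = left
--             else:
--                 direction = right
--         first, second = min_idx, min_idx + direction  # if direction == right
--         if direction == left:
--             first, second = second, first
--         tmp_segments[first] = tmp_segments[first] + ' ' + tmp_segments[second]
--         del tmp_segments[second]
--         min_seg, min_idx = min_segment(tmp_segments, len)
--     return tmp_segments
-- ===== SOURCE B (Python) =====
-- def merge_vocab_str(vocab_str, min_len=4):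
--     # Round-based sweep: each round merges EVERY segment of the current minimum
--     # length in one left-to-right pass (the global minimum never decreases, and
--     # segments left of the sweep pointer are always longer than it, so each merge
--     # target coincides with A's leftmost argmin).
--     segs = list(vocab_str)
--     m = min(len(s) for s in segs)
--     while m < min_len and len(segs) > 1:
--         i = 0
--         while i < len(segs) and len(segs) > 1:
--             if len(segs[i]) != m:
--                 i += 1
--             elif i == 0 or (i + 1 < len(segs) and len(segs[i - 1]) >= len(segs[i + 1])):
--                 segs[i] = segs[i] + ' ' + segs[i + 1]
--                 del segs[i + 1]
--                 i += 1
--             else: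
--                 segs[i - 1] = segs[i - 1] + ' ' + segs[i]
--                 del segs[i]
--         m = min(len(s) for s in segs)
--     return segs
-- ===== Notes on version B (the rewrite author's own statement) =====
-- stated objective: faster
-- what changed: A rescans the whole list for the argmin after every single merge; B works in rounds: it computes the current minimum length once per round and then merges EVERY minimum-length segment in one left-to-right sweep with a moving pointer (valid because the global minimum never decreases and everything left of the pointer is strictly longer), so the scan cost is amortized over many merges.
import Mathlib
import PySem

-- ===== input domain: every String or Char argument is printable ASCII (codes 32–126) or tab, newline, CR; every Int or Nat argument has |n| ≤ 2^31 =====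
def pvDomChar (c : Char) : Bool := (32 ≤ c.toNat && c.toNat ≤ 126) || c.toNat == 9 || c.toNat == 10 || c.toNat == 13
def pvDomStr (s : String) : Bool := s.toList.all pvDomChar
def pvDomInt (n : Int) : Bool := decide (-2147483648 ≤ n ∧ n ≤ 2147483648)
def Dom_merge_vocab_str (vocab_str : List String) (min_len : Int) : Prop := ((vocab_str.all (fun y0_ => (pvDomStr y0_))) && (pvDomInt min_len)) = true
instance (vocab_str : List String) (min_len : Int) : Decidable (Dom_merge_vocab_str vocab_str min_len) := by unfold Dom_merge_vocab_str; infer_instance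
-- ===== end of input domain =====

-- B replaces A's argmin-rescan-per-merge by rounds that merge EVERY current-minimum-length
-- segment in one left-to-right sweep (the global minimum never decreases), amortizing the scan.

-- ===== PORT A =====
-- port of min_segment(segments, len): none models the IndexError on an empty list
def min_segment (segments : List String) : Option (String × Int) :=
  match PySem.List.pyGet? segments 0 with
  | none => none
  | some s0 =>
    let acc := (PySem.List.enumerate segments).foldl
      (fun (acc : Int × Int) (p : Int × String) =>
        if PySem.Str.len p.2 < acc.2 then (p.1, PySem.Str.len p.2) else acc)
      (0, PySem.Str.len s0)
    some (PySem.List.pyGetD segments acc.1 "", acc.1)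

-- A's while loop; fuel = initial segment count (each iteration removes one segment)
def mergeLoopA (fuel : Nat) (segs : List String) (min_seg : String) (min_idx : Int) (min_len : Int) : List String :=
  match fuel with
  | 0 => segs
  | fuel + 1 =>
    if PySem.Str.len min_seg < min_len ∧ 1 < segs.length then
      -- left = -1, right = 1
      let direction : Int :=
        if min_idx = 0 then 1
        else if min_idx = (segs.length : Int) - 1 then -1
        else
          let left_size := PySem.Str.len (PySem.List.pyGetD segs (min_idx - 1) "")
          let right_size := PySem.Str.len (PySem.List.pyGetD segs (min_idx + 1) "")
          if left_size < right_size then -1 else 1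
      let fs := if direction = -1 then (min_idx + direction, min_idx) else (min_idx, min_idx + direction)
      let segs' := PySem.List.pySetD segs fs.1
        (PySem.List.pyGetD segs fs.1 "" ++ " " ++ PySem.List.pyGetD segs fs.2 "")
      let segs'' := match PySem.List.pop? segs' fs.2 with
                    | some r => r.2
                    | none => segs'  -- IndexError; unreachable, fs.2 is in range
      match min_segment segs'' with
      | none => segs''  -- IndexError; unreachable, segs'' is nonempty
      | some (ms, mi) => mergeLoopA fuel segs'' ms mi min_len
    else segs

def merge_vocab_str (vocab_str : List String) (min_len : Int) : List String :=
  let tmp := vocab_str.map (fun e => e)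
  match min_segment tmp with
  | none => tmp  -- Python raises IndexError here (vocab_str = []); outside Pre_
  | some (ms, mi) => mergeLoopA tmp.length tmp ms mi min_len

-- ===== PORT B =====
-- B's inner sweep: merge every segment of length m in one pass; pointer i moves right
def sweepB (segs : List String) (m : Int) (i : Nat) : List String :=
  if h : i < segs.length ∧ 1 < segs.length then
    if PySem.Str.len (PySem.List.pyGetD segs (i : Int) "") ≠ m then
      sweepB segs m (i + 1)
    else if hd : i = 0 ∨ (i + 1 < segs.length ∧
        PySem.Str.len (PySem.List.pyGetD segs ((i : Int) + 1) "") ≤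
        PySem.Str.len (PySem.List.pyGetD segs ((i : Int) - 1) "")) then
      sweepB ((segs.set i (PySem.List.pyGetD segs (i : Int) "" ++ " " ++ PySem.List.pyGetD segs ((i : Int) + 1) "")).eraseIdx (i + 1)) m (i + 1)
    else
      sweepB ((segs.set (i - 1) (PySem.List.pyGetD segs ((i : Int) - 1) "" ++ " " ++ PySem.List.pyGetD segs (i : Int) "")).eraseIdx i) m i
  else segs
termination_by 2 * segs.length - i
decreasing_by
  · omega
  · simp only [List.length_eraseIdx, List.length_set]
    split_ifs <;> omega
  · simp only [List.length_eraseIdx, List.length_set]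
    split_ifs <;> omega

-- B's outer round loop; fuel = segment count (each proceeding round merges at least once)
def loopB (fuel : Nat) (segs : List String) (m : Int) (min_len : Int) : List String :=
  match fuel with
  | 0 => segs
  | fuel + 1 =>
    if m < min_len ∧ 1 < segs.length then
      let segs' := sweepB segs m 0
      match PySem.List.min? (segs'.map PySem.Str.len) (fun x => x) with
      | none => segs'  -- unreachable: segs' is nonempty
      | some m' => loopB fuel segs' m' min_len
    else segs

def merge_vocab_str_alt (vocab_str : List String) (min_len : Int) : List String :=
  match PySem.List.min? (vocab_str.map PySem.Str.len) (fun x => x) with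
  | none => vocab_str  -- Python raises ValueError here (vocab_str = []); outside Pre_
  | some m => loopB vocab_str.length vocab_str m min_len

-- ===== PRECONDITION & SPEC =====
-- Pre_ excludes only the empty list, on which A raises IndexError (segments[0] in min_segment).
def Pre_merge_vocab_str (vocab_str : List String) (min_len : Int) : Prop := vocab_str ≠ []
instance (vocab_str : List String) (min_len : Int) : Decidable (Pre_merge_vocab_str vocab_str min_len) := by unfold Pre_merge_vocab_str; infer_instance

def pvWitness_merge_vocab_str : List String × Int := (["ab", "cde"], 4)

def Spec_merge_vocab_str (vocab_str : List String) (min_len : Int) (out : List String) : Prop := out = merge_vocab_str_alt vocab_str min_len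
instance (vocab_str : List String) (min_len : Int) (out : List String) : Decidable (Spec_merge_vocab_str vocab_str min_len out) := by unfold Spec_merge_vocab_str; infer_instance

-- ===== CLAIM (what is proved, stated in full; the proofs are below) =====
def Claim_equal_merge_vocab_str : Prop := ∀ (vocab_str : List String) (min_len : Int), Dom_merge_vocab_str vocab_str min_len → Pre_merge_vocab_str vocab_str min_len → Spec_merge_vocab_str vocab_str min_len (merge_vocab_str vocab_str min_len)

-- ===== LEMMAS AND PROOFS =====

-- (first argmin index, min value) of a list of lengths — proof-side spec of A's min_segment
def firstMin : List Int → Option (Nat × Int)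
  | [] => none
  | x :: t =>
    match firstMin t with
    | none => some (0, x)
    | some (j, m) => if x ≤ m then some (0, x) else some (j + 1, m)

-- A's enumerate-fold, in recursion-friendly form
def argminAux : List Int → Int → Int → Int → Int × Int
  | [], _, mi, ms => (mi, ms)
  | x :: t, k, mi, ms => if x < ms then argminAux t (k + 1) k x else argminAux t (k + 1) mi ms

theorem firstMin_cons (x : Int) (t : List Int) :
    firstMin (x :: t) =
      match firstMin t with
      | none => some (0, x)
      | some (j, m) => if x ≤ m then some (0, x) else some (j + 1, m) := rfl

theorem firstMin_cons_none (x : Int) {t : List Int} (h : firstMin t = none) :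
    firstMin (x :: t) = some (0, x) := by rw [firstMin_cons, h]

theorem firstMin_cons_some (x : Int) {t : List Int} {j : Nat} {m : Int}
    (h : firstMin t = some (j, m)) :
    firstMin (x :: t) = if x ≤ m then some (0, x) else some (j + 1, m) := by
  rw [firstMin_cons, h]

theorem firstMin_eq_none_iff (l : List Int) : firstMin l = none ↔ l = [] := by
  cases l with
  | nil => simp [firstMin]
  | cons x t =>
    cases ht : firstMin t with
    | none => rw [firstMin_cons_none x ht]; simp
    | some p =>
      obtain ⟨j, m⟩ := p
      rw [firstMin_cons_some x ht]
      by_cases h : x ≤ m <;> simp [h]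

theorem firstMin_getElem (l : List Int) (i : Nat) (m : Int) (h : firstMin l = some (i, m)) :
    ∃ hi : i < l.length, l[i] = m := by
  induction l generalizing i m with
  | nil => simp [firstMin] at h
  | cons x t ih =>
    cases ht : firstMin t with
    | none =>
      rw [firstMin_cons_none x ht] at h
      simp only [Option.some.injEq, Prod.mk.injEq] at h
      obtain ⟨h1, h2⟩ := h
      subst h2; subst h1
      exact ⟨by simp, by simp⟩
    | some p =>
      obtain ⟨j, mt⟩ := p
      rw [firstMin_cons_some x ht] at h
      by_cases hx : x ≤ mt
      · rw [if_pos hx] at h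
        simp only [Option.some.injEq, Prod.mk.injEq] at h
        obtain ⟨h1, h2⟩ := h
        subst h2; subst h1
        exact ⟨by simp, by simp⟩
      · rw [if_neg hx] at h
        simp only [Option.some.injEq, Prod.mk.injEq] at h
        obtain ⟨h1, h2⟩ := h
        subst h2; subst h1
        obtain ⟨hj, hjm⟩ := ih _ _ ht
        exact ⟨by simpa using Nat.succ_lt_succ hj, by simpa using hjm⟩

theorem firstMin_head_le (x : Int) (t : List Int) (i : Nat) (m : Int)
    (h : firstMin (x :: t) = some (i, m)) : m ≤ x := by
  cases ht : firstMin t with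
  | none =>
    rw [firstMin_cons_none x ht] at h
    simp only [Option.some.injEq, Prod.mk.injEq] at h
    omega
  | some p =>
    obtain ⟨j, mt⟩ := p
    rw [firstMin_cons_some x ht] at h
    by_cases hx : x ≤ mt
    · rw [if_pos hx] at h
      simp only [Option.some.injEq, Prod.mk.injEq] at h
      omega
    · rw [if_neg hx] at h
      simp only [Option.some.injEq, Prod.mk.injEq] at h
      omega

theorem firstMin_foldl (l : List Int) (i : Nat) (m : Int)
    (h : firstMin l = some (i, m)) : ∀ a : Int, l.foldl min a = min a m := by
  induction l generalizing i m with
  | nil => simp [firstMin] at h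
  | cons x t ih =>
    intro a
    cases ht : firstMin t with
    | none =>
      rw [firstMin_cons_none x ht] at h
      rw [firstMin_eq_none_iff] at ht
      subst ht
      simp only [Option.some.injEq, Prod.mk.injEq] at h
      obtain ⟨h1, h2⟩ := h
      subst h2
      simp [List.foldl_cons]
    | some p =>
      obtain ⟨j, mt⟩ := p
      rw [firstMin_cons_some x ht] at h
      have hfold := ih j mt ht (min a x)
      by_cases hx : x ≤ mt
      · rw [if_pos hx] at h
        simp only [Option.some.injEq, Prod.mk.injEq] at h
        obtain ⟨h1, h2⟩ := h
        subst h2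
        rw [List.foldl_cons, hfold]
        omega
      · rw [if_neg hx] at h
        simp only [Option.some.injEq, Prod.mk.injEq] at h
        obtain ⟨h1, h2⟩ := h
        subst h2
        rw [List.foldl_cons, hfold]
        omega

theorem firstMin_min? (l : List Int) (i : Nat) (m : Int)
    (h : firstMin l = some (i, m)) :
    PySem.List.min? l (fun y => y) = some m := by
  cases l with
  | nil => simp [firstMin] at h
  | cons x t =>
    rw [PySem.List.min?_id_cons]
    congr 1
    have h1 : (x :: t).foldl min x = min x m := firstMin_foldl _ _ _ h x
    have h2 : m ≤ x := firstMin_head_le _ _ _ _ h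
    have h3 : (x :: t).foldl min x = t.foldl min x := by
      simp [List.foldl_cons]
    rw [h3] at h1
    omega

theorem argminAux_none (t : List Int) (k mi ms : Int) (h : firstMin t = none) :
    argminAux t k mi ms = (mi, ms) := by
  rw [firstMin_eq_none_iff] at h
  subst h
  rfl

theorem argminAux_some (t : List Int) (j : Nat) (m : Int)
    (h : firstMin t = some (j, m)) (k mi ms : Int) :
    argminAux t k mi ms = if m < ms then (k + (j : Int), m) else (mi, ms) := by
  induction t generalizing j m k mi ms with
  | nil => simp [firstMin] at h
  | cons x t ih =>
    show (if x < ms then argminAux t (k + 1) k x else argminAux t (k + 1) mi ms) = _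
    cases ht : firstMin t with
    | none =>
      rw [firstMin_cons_none x ht] at h
      simp only [Option.some.injEq, Prod.mk.injEq] at h
      obtain ⟨h1, h2⟩ := h
      subst h2; subst h1
      rw [argminAux_none t (k+1) k x ht, argminAux_none t (k+1) mi ms ht]
      split_ifs <;> simp
    | some p =>
      obtain ⟨j', m'⟩ := p
      rw [firstMin_cons_some x ht] at h
      rw [ih j' m' ht (k+1) k x, ih j' m' ht (k+1) mi ms]
      by_cases hx : x ≤ m'
      · rw [if_pos hx] at h
        simp only [Option.some.injEq, Prod.mk.injEq] at h
        obtain ⟨h1, h2⟩ := h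
        subst h2; subst h1
        split_ifs <;>
          first
          | rfl
          | (exfalso; omega)
          | (simp only [Prod.mk.injEq]; constructor <;> push_cast <;> omega)
      · rw [if_neg hx] at h
        simp only [Option.some.injEq, Prod.mk.injEq] at h
        obtain ⟨h1, h2⟩ := h
        subst h2; subst h1
        split_ifs <;>
          first
          | rfl
          | (exfalso; omega)
          | (simp only [Prod.mk.injEq]; constructor <;> push_cast <;> omega)

-- the A-side fold equals argminAux on the projected lengths
theorem fold_eq_argminAux (segs : List String) (k : Int) (mi ms : Int) :
    (PySem.List.enumerate segs k).foldl
      (fun (acc : Int × Int) (p : Int × String) =>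
        if PySem.Str.len p.2 < acc.2 then (p.1, PySem.Str.len p.2) else acc)
      (mi, ms)
    = argminAux (segs.map PySem.Str.len) k mi ms := by
  induction segs generalizing k mi ms with
  | nil => simp [PySem.List.enumerate_nil, argminAux]
  | cons s t ih =>
    rw [PySem.List.enumerate_cons]
    simp only [List.foldl_cons, List.map_cons, argminAux]
    by_cases h : PySem.Str.len s < ms
    · rw [if_pos h, if_pos h]
      exact ih (k + 1) k (PySem.Str.len s)
    · rw [if_neg h, if_neg h]
      exact ih (k + 1) mi ms

theorem pyGetD_seg (segs : List String) (j : Nat) (hj : j < segs.length) :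
    PySem.List.pyGetD segs (j : Int) "" = segs[j] := by
  rw [PySem.List.pyGetD_natCast]
  exact List.getD_eq_getElem _ _ hj

-- min_segment characterised through firstMin of the projected lengths
theorem min_segment_eq (segs : List String) (hne : segs ≠ [])
    (i : Nat) (m : Int)
    (h : firstMin (segs.map PySem.Str.len) = some (i, m)) :
    min_segment segs = some (PySem.List.pyGetD segs (i : Int) "", (i : Int)) ∧
    PySem.Str.len (PySem.List.pyGetD segs (i : Int) "") = m := by
  obtain ⟨s0, rest, rfl⟩ : ∃ s0 rest, segs = s0 :: rest := by
    cases segs with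
    | nil => simp at hne
    | cons a b => exact ⟨a, b, rfl⟩
  have hgetD : PySem.List.pyGetD (s0 :: rest) (i : Int) "" = (s0 :: rest)[i]'(by
      obtain ⟨hi, _⟩ := firstMin_getElem _ _ _ h
      simpa using hi) := by
    apply pyGetD_seg
  constructor
  · rw [List.map_cons] at h
    unfold min_segment
    rw [PySem.List.pyGet?_zero_cons]
    dsimp only
    rw [fold_eq_argminAux]
    have hfold : argminAux ((s0 :: rest).map PySem.Str.len) 0 0 (PySem.Str.len s0) = ((i : Int), m) := by
      simp only [List.map_cons, argminAux]
      rw [if_neg (by omega : ¬ PySem.Str.len s0 < PySem.Str.len s0)]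
      cases ht : firstMin (rest.map PySem.Str.len) with
      | none =>
        rw [firstMin_cons_none _ ht] at h
        simp only [Option.some.injEq, Prod.mk.injEq] at h
        obtain ⟨h1, h2⟩ := h
        subst h2; subst h1
        rw [argminAux_none _ _ _ _ ht]
        simp
      | some p =>
        obtain ⟨j, mt⟩ := p
        rw [firstMin_cons_some _ ht] at h
        rw [argminAux_some _ _ _ ht]
        by_cases hx : PySem.Str.len s0 ≤ mt
        · rw [if_pos hx] at h
          simp only [Option.some.injEq, Prod.mk.injEq] at h
          obtain ⟨h1, h2⟩ := h
          subst h2; subst h1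
          rw [if_neg (show ¬ mt < PySem.Str.len s0 by omega)]
          simp
        · rw [if_neg hx] at h
          simp only [Option.some.injEq, Prod.mk.injEq] at h
          obtain ⟨h1, h2⟩ := h
          subst h2; subst h1
          rw [if_pos (show mt < PySem.Str.len s0 by omega)]
          have hc : (0 : Int) + 1 + (j : Int) = (((j+1 : Nat)) : Int) := by push_cast; ring
          rw [hc]
    rw [hfold]
  · rw [hgetD]
    obtain ⟨hi, hv⟩ := firstMin_getElem _ _ _ h
    rw [List.getElem_map] at hv
    exact hv

theorem min_segment_some (segs : List String) (h : segs ≠ []) :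
    ∃ p, min_segment segs = some p := by
  cases segs with
  | nil => simp at h
  | cons s t =>
    unfold min_segment
    rw [PySem.List.pyGet?_zero_cons]
    exact ⟨_, rfl⟩

-- firstMin from the sweep invariant: prefix strictly above m, value m at i, everything ≥ m
theorem firstMin_of_inv (l : List Int) (m : Int) (i : Nat) (hi : i < l.length)
    (hpre : ∀ j (hj : j < l.length), j < i → m < l[j])
    (hlb : ∀ j (hj : j < l.length), m ≤ l[j])
    (hm : l[i] = m) :
    firstMin l = some (i, m) := by
  induction l generalizing i with
  | nil => simp at hi
  | cons x t ih =>
    cases i with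
    | zero =>
      simp only [List.getElem_cons_zero] at hm
      subst hm
      cases ht : firstMin t with
      | none => exact firstMin_cons_none x ht
      | some p =>
        obtain ⟨j, mt⟩ := p
        obtain ⟨hj, hjv⟩ := firstMin_getElem _ _ _ ht
        have : x ≤ mt := by
          have := hlb (j + 1) (by simpa using Nat.succ_lt_succ hj)
          simp only [List.getElem_cons_succ] at this
          rw [hjv] at this
          omega
        rw [firstMin_cons_some x ht, if_pos this]
    | succ i' =>
      have hx : m < x := by
        have := hpre 0 (by simp) (by omega)
        simpa using this
      have hrec : firstMin t = some (i', m) := by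
        apply ih i' (by simpa using hi)
        · intro j hj hji
          have := hpre (j + 1) (by simpa using Nat.succ_lt_succ hj) (by omega)
          simpa using this
        · intro j hj
          have := hlb (j + 1) (by simpa using Nat.succ_lt_succ hj)
          simpa using this
        · simpa using hm
      rw [firstMin_cons_some x hrec, if_neg (by omega)]

-- helper: lengths list nonempty / min? of a nonempty lengths list is some
theorem min?_lens_some (segs : List String) (h : segs ≠ []) :
    ∃ m, PySem.List.min? (segs.map PySem.Str.len) (fun x => x) = some m := by
  cases segs with
  | nil => simp at h
  | cons s t => exact ⟨_, PySem.List.min?_id_cons _ _⟩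

theorem len_join (a b : String) :
    PySem.Str.len (a ++ " " ++ b) = PySem.Str.len a + 1 + PySem.Str.len b := by
  rw [PySem.Str.len_append, PySem.Str.len_append]
  have h1 : PySem.Str.len " " = 1 := by decide
  omega

theorem merged_ne_nil (segs : List String) (a j : Nat) (s : String) (h : 1 < segs.length) :
    (segs.set a s).eraseIdx j ≠ [] := by
  have hl : ((segs.set a s).eraseIdx j).length ≠ 0 := by
    rw [List.length_eraseIdx]
    simp only [List.length_set]
    split_ifs <;> omega
  intro hc
  rw [hc] at hl
  simp at hl

-- elements of a set-then-erase merged list, by position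
theorem getElem_merge (segs : List String) (a b : Nat) (v : String)
    (hab : a < b) (hb : b < segs.length)
    (j : Nat) (hj : j < ((segs.set a v).eraseIdx b).length) :
    ((segs.set a v).eraseIdx b)[j] =
      if hja : j = a then v
      else if hjb : j < b then segs[j]'(by simp [List.length_eraseIdx, List.length_set, hb] at hj; omega)
      else segs[j+1]'(by simp [List.length_eraseIdx, List.length_set, hb] at hj; omega) := by
  rw [List.getElem_eraseIdx]
  by_cases hjb : j < b
  · rw [dif_pos hjb, List.getElem_set]
    by_cases hja : j = a
    · rw [if_pos hja.symm, dif_pos hja]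
    · rw [if_neg (fun he => hja he.symm), dif_neg hja, dif_pos hjb]
  · rw [dif_neg hjb, List.getElem_set]
    rw [if_neg (by omega), dif_neg (show ¬ j = a by omega), dif_neg hjb]

theorem length_merge (segs : List String) (a b : Nat) (v : String) (hb : b < segs.length) :
    ((segs.set a v).eraseIdx b).length = segs.length - 1 := by
  simp [List.length_eraseIdx, List.length_set, hb]

-- sweepB can only shrink the list
theorem sweep_len_le (segs : List String) (m : Int) (i : Nat) :
    (sweepB segs m i).length ≤ segs.length := by
  fun_induction sweepB with
  | case1 segs i h h1 ih => exact ih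
  | case2 segs i h h1 hd ih =>
    have hlt : i + 1 < segs.length := by rcases hd with h0 | hx <;> omega
    rw [length_merge _ _ _ _ hlt] at ih
    omega
  | case3 segs i h h1 hd ih =>
    rw [length_merge _ _ _ _ h.1] at ih
    omega
  | case4 segs i h => omega

-- a sweep that still has a length-m segment ahead of the pointer strictly shrinks
theorem sweep_shrinks (segs : List String) (m : Int) (i : Nat)
    (hn : 1 < segs.length)
    (hex : ∃ j, ∃ hj : j < segs.length, i ≤ j ∧ PySem.Str.len segs[j] = m) :
    (sweepB segs m i).length < segs.length := by
  fun_induction sweepB with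
  | case1 segs i h h1 ih =>
    obtain ⟨j, hj, hij, hjm⟩ := hex
    have hji : j ≠ i := by
      intro he; subst he
      exact h1 (by rw [pyGetD_seg segs j hj, hjm])
    exact ih h.2 ⟨j, hj, by omega, hjm⟩
  | case2 segs i h h1 hd ih =>
    have hlt : i + 1 < segs.length := by rcases hd with h0 | hx <;> omega
    have hle := sweep_len_le ((segs.set i (PySem.List.pyGetD segs (i : Int) "" ++ " " ++ PySem.List.pyGetD segs ((i : Int) + 1) "")).eraseIdx (i + 1)) m (i + 1)
    rw [length_merge _ _ _ _ hlt] at hle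
    omega
  | case3 segs i h h1 hd ih =>
    have hle := sweep_len_le ((segs.set (i - 1) (PySem.List.pyGetD segs ((i : Int) - 1) "" ++ " " ++ PySem.List.pyGetD segs (i : Int) "")).eraseIdx i) m i
    rw [length_merge _ _ _ _ h.1] at hle
    omega
  | case4 segs i h =>
    obtain ⟨j, hj, hij, _⟩ := hex
    exact absurd ⟨by omega, hn⟩ h

-- string lengths are nonnegative
theorem str_len_nonneg (s : String) : 0 ≤ PySem.Str.len s := by
  rw [PySem.Str.len_eq]
  exact Int.natCast_nonneg _

-- invariant preservation: the prefix below a+1 of a merged list is strictly above m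
theorem inv_merge_pre (segs : List String) (m : Int) (a : Nat) (v : String)
    (hab : a + 1 < segs.length) (hv : m < PySem.Str.len v)
    (hpre : ∀ j (hj : j < segs.length), j < a → m < PySem.Str.len segs[j]) :
    ∀ j (hj : j < ((segs.set a v).eraseIdx (a+1)).length), j < a + 1 →
      m < PySem.Str.len (((segs.set a v).eraseIdx (a+1))[j]) := by
  intro j hj hji
  rw [getElem_merge segs a (a+1) v (by omega) hab]
  by_cases h1 : j = a
  · rw [dif_pos h1]; exact hv
  · rw [dif_neg h1, dif_pos (show j < a + 1 by omega)]
    exact hpre j (by omega) (by omega)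

-- invariant preservation: every element of a merged list is still ≥ m
theorem inv_merge_lb (segs : List String) (m : Int) (a : Nat) (v : String)
    (hab : a + 1 < segs.length) (hv : m ≤ PySem.Str.len v)
    (hlb : ∀ j (hj : j < segs.length), m ≤ PySem.Str.len segs[j]) :
    ∀ j (hj : j < ((segs.set a v).eraseIdx (a+1)).length),
      m ≤ PySem.Str.len (((segs.set a v).eraseIdx (a+1))[j]) := by
  intro j hj
  rw [getElem_merge segs a (a+1) v (by omega) hab]
  by_cases h1 : j = a
  · rw [dif_pos h1]; exact hv
  · rw [dif_neg h1]
    by_cases h2 : j < a + 1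
    · rw [dif_pos h2]; exact hlb j (by omega)
    · rw [dif_neg h2]
      have hl : j + 1 < segs.length := by
        rw [length_merge _ _ _ _ hab] at hj
        omega
      exact hlb (j+1) hl

-- The central simulation: running A's merge loop equals finishing B's current sweep and
-- continuing with B's rounds, provided the sweep invariant holds.
theorem sweep_sim (min_len : Int) (N : Nat)
    (HO : ∀ (segs : List String) (m : Int) (fa fb : Nat) (ms : String) (mi : Int),
        segs.length ≤ N → segs ≠ [] → segs.length ≤ fa → segs.length ≤ fb →
        PySem.List.min? (segs.map PySem.Str.len) (fun x => x) = some m →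
        min_segment segs = some (ms, mi) →
        mergeLoopA fa segs ms mi min_len = loopB fb segs m min_len) :
    ∀ (μ : Nat) (segs : List String) (m : Int) (i : Nat) (fa fb : Nat) (ms : String) (mi : Int),
    2 * segs.length - i ≤ μ →
    segs ≠ [] → i ≤ segs.length → segs.length ≤ N + 1 →
    segs.length ≤ fa → (sweepB segs m i).length ≤ fb →
    m < min_len →
    (∀ j (hj : j < segs.length), j < i → m < PySem.Str.len segs[j]) →
    (∀ j (hj : j < segs.length), m ≤ PySem.Str.len segs[j]) →
    (segs.length ≤ N ∨ ∃ j, ∃ hj : j < segs.length, i ≤ j ∧ PySem.Str.len segs[j] = m) →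
    min_segment segs = some (ms, mi) →
    mergeLoopA fa segs ms mi min_len =
      (match PySem.List.min? ((sweepB segs m i).map PySem.Str.len) (fun x => x) with
       | none => sweepB segs m i
       | some m' => loopB fb (sweepB segs m i) m' min_len) := by
  intro μ
  induction μ with
  | zero =>
    intro segs m i fa fb ms mi hμ hne hi hsN hfa hfb hml hpre hlb hdis hseg
    exfalso
    have h1 : 0 < segs.length := List.length_pos_of_ne_nil hne
    omega
  | succ μ ihμ =>
    intro segs m i fa fb ms mi hμ hne hi hsN hfa hfb hml hpre hlb hdis hseg
    have h1 : 0 < segs.length := List.length_pos_of_ne_nil hne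
    by_cases hcont : i < segs.length ∧ 1 < segs.length
    case neg =>
      have hsw : sweepB segs m i = segs := by rw [sweepB, dif_neg hcont]
      rw [hsw] at hfb ⊢
      obtain ⟨m'', hmin''⟩ := min?_lens_some segs hne
      rw [hmin'']
      by_cases hone : segs.length = 1
      · obtain ⟨fa', rfl⟩ : ∃ fa', fa = fa' + 1 := ⟨fa - 1, by omega⟩
        obtain ⟨fb', rfl⟩ : ∃ fb', fb = fb' + 1 := ⟨fb - 1, by omega⟩
        simp only [mergeLoopA, loopB]
        rw [if_neg (by omega), if_neg (by omega)]
      · have hN' : segs.length ≤ N := by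
          rcases hdis with h | ⟨j, hj, hij, _⟩
          · exact h
          · omega
        exact HO segs m'' fa fb ms mi hN' hne hfa hfb hmin'' hseg
    case pos =>
      have hget : PySem.List.pyGetD segs (i : Int) "" = segs[i]'hcont.1 := pyGetD_seg segs i hcont.1
      by_cases hskip : PySem.Str.len (segs[i]'hcont.1) = m
      case neg =>
        have hsw : sweepB segs m i = sweepB segs m (i + 1) := by
          rw [sweepB, dif_pos hcont, if_pos (by rw [hget]; exact hskip)]
        rw [hsw] at hfb ⊢
        refine ihμ segs m (i+1) fa fb ms mi ?_ hne hcont.1 hsN hfa hfb hml ?_ hlb ?_ hseg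
        · clear hdis hseg hfb hsw hpre hlb
          omega
        · intro j hj hji
          rcases Nat.lt_or_ge j i with hji' | hji'
          · exact hpre j hj hji'
          · have : j = i := by omega
            subst this
            have := hlb j hj
            omega
        · rcases hdis with h | ⟨j, hj, hij, hjm⟩
          · exact Or.inl h
          · refine Or.inr ⟨j, hj, ?_, hjm⟩
            have hne2 : j ≠ i := by
              intro he
              subst he
              exact hskip hjm
            omega
      case pos =>
        -- the pointer sits on A's leftmost argmin: merge step on both sides
        have hfm : firstMin (segs.map PySem.Str.len) = some (i, m) := by
          apply firstMin_of_inv _ m i (by simpa using hcont.1)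
          · intro j hj hji
            rw [List.getElem_map]
            exact hpre j (by simpa using hj) hji
          · intro j hj
            rw [List.getElem_map]
            exact hlb j (by simpa using hj)
          · rw [List.getElem_map]
            exact hskip
        obtain ⟨hsegEq, hlenEq⟩ := min_segment_eq segs hne i m hfm
        rw [hseg] at hsegEq
        simp only [Option.some.injEq, Prod.mk.injEq] at hsegEq
        obtain ⟨hms, hmi⟩ := hsegEq
        subst hms; subst hmi
        obtain ⟨fa', rfl⟩ : ∃ fa', fa = fa' + 1 := ⟨fa - 1, by omega⟩
        have hcnd : PySem.Str.len (PySem.List.pyGetD segs ((i : Nat) : Int) "") < min_len ∧ 1 < segs.length :=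
          ⟨by rw [hlenEq]; exact hml, hcont.2⟩
        simp only [mergeLoopA]
        rw [if_pos hcnd]
        have hBskip : ¬ PySem.Str.len (PySem.List.pyGetD segs ((i : Nat) : Int) "") ≠ m := by
          rw [hget]
          exact not_not_intro hskip
        by_cases hi0 : i = 0
        · -- merge right at position 0
          have hiR : i + 1 < segs.length := by omega
          rw [if_pos (show ((i : Nat) : Int) = 0 by omega)]
          try rw [if_neg (show ¬ (1 : Int) = -1 by norm_num)]
          try dsimp only
          have hc1 : ((i : Nat) : Int) + 1 = (((i + 1 : Nat)) : Int) := by push_cast; ring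
          have eR : PySem.List.pyGetD segs (((i + 1 : Nat)) : Int) "" = segs[i + 1] := pyGetD_seg segs (i+1) hiR
          simp only [hc1, hget, eR]
          try simp only [PySem.List.pySetD_natCast, PySem.List.pop?_natCast, List.length_set, hiR]
          have hne' := merged_ne_nil segs i (i+1) (segs[i] ++ " " ++ segs[i+1]) hcont.2
          obtain ⟨⟨ms', mi'⟩, hseg'⟩ := min_segment_some _ hne'
          simp only [hseg']
          have hsw : sweepB segs m i =
              sweepB ((segs.set i (segs[i] ++ " " ++ segs[i+1])).eraseIdx (i+1)) m (i+1) := by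
            rw [sweepB, dif_pos hcont, if_neg hBskip, dif_pos (Or.inl hi0)]
            simp only [hget, eR, hc1]
          rw [hsw] at hfb ⊢
          have hlm : ((segs.set i (segs[i] ++ " " ++ segs[i+1])).eraseIdx (i+1)).length = segs.length - 1 :=
            length_merge _ _ _ _ hiR
          have hvlen : m < PySem.Str.len (segs[i] ++ " " ++ segs[i+1]) := by
            have h0 := hlb i hcont.1
            have h1' := hlb (i+1) hiR
            have hnn := str_len_nonneg (segs[i])
            rw [len_join]
            omega
          refine ihμ _ m (i+1) fa' fb ms' mi' ?_ hne' ?_ ?_ ?_ hfb hml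
            (inv_merge_pre segs m i _ hiR hvlen (fun j hj hji => hpre j hj (by omega)))
            (inv_merge_lb segs m i _ hiR (by omega) hlb)
            (Or.inl (by omega)) hseg'
          all_goals omega
        · by_cases hilast : i = segs.length - 1
          · -- merge left at the last position
            have hi1 : 1 ≤ i := by omega
            rw [if_neg (show ¬ ((i : Nat) : Int) = 0 by omega)]
            rw [if_pos (show ((i : Nat) : Int) = (segs.length : Int) - 1 by omega)]
            try rw [if_pos (show (-1 : Int) = -1 from rfl)]
            try dsimp only
            have em1 : ((i : Nat) : Int) + -1 = (((i - 1 : Nat)) : Int) := by omega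
            have em2 : ((i : Nat) : Int) - 1 = (((i - 1 : Nat)) : Int) := by omega
            have eL : PySem.List.pyGetD segs (((i - 1 : Nat)) : Int) "" = segs[i-1] := pyGetD_seg segs (i-1) (by omega)
            try simp only [em1, em2, hget, eL]
            try simp only [PySem.List.pySetD_natCast, PySem.List.pop?_natCast, List.length_set, hcont.1]
            have heq : i - 1 + 1 = i := by omega
            have hne' := merged_ne_nil segs (i-1) i (segs[i-1] ++ " " ++ segs[i]) hcont.2
            obtain ⟨⟨ms', mi'⟩, hseg'⟩ := min_segment_some _ hne'
            simp only [hseg']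
            have hsw : sweepB segs m i =
                sweepB ((segs.set (i-1) (segs[i-1] ++ " " ++ segs[i])).eraseIdx i) m i := by
              rw [sweepB, dif_pos hcont, if_neg hBskip,
                dif_neg (by
                  rintro (h0 | ⟨h2, _⟩)
                  · exact hi0 h0
                  · omega)]
              simp only [hget, em2, eL]
            rw [hsw] at hfb ⊢
            have hab : (i - 1) + 1 < segs.length := by omega
            have hlm := length_merge segs (i-1) ((i-1)+1) (segs[i-1] ++ " " ++ segs[i]) hab
            rw [heq] at hlm
            have hvlen : m < PySem.Str.len (segs[i-1] ++ " " ++ segs[i]) := by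
              have h0 := hlb (i-1) (by omega)
              have h1' := hlb i hcont.1
              have hnn := str_len_nonneg (segs[i-1])
              rw [len_join]
              omega
            have hpre' := inv_merge_pre segs m (i-1) (segs[i-1] ++ " " ++ segs[i]) hab hvlen
              (fun j hj hji => hpre j hj (by omega))
            have hlb' := inv_merge_lb segs m (i-1) (segs[i-1] ++ " " ++ segs[i]) hab (by omega) hlb
            rw [heq] at hpre' hlb'
            refine ihμ _ m i fa' fb ms' mi' ?_ hne' ?_ ?_ ?_ hfb hml
              (fun j hj hji => hpre' j hj (by omega)) hlb' (Or.inl (by omega)) hseg'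
            all_goals omega
          · -- interior position: compare the two neighbours
            have hi1 : 1 ≤ i := by omega
            have hiR : i + 1 < segs.length := by omega
            rw [if_neg (show ¬ ((i : Nat) : Int) = 0 by omega)]
            rw [if_neg (show ¬ ((i : Nat) : Int) = (segs.length : Int) - 1 by omega)]
            have hc1 : ((i : Nat) : Int) + 1 = (((i + 1 : Nat)) : Int) := by push_cast; ring
            have em1 : ((i : Nat) : Int) + -1 = (((i - 1 : Nat)) : Int) := by omega
            have em2 : ((i : Nat) : Int) - 1 = (((i - 1 : Nat)) : Int) := by omega
            have eL : PySem.List.pyGetD segs (((i - 1 : Nat)) : Int) "" = segs[i-1] := pyGetD_seg segs (i-1) (by omega)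
            have eR : PySem.List.pyGetD segs (((i + 1 : Nat)) : Int) "" = segs[i+1] := pyGetD_seg segs (i+1) hiR
            simp only [hc1, em2, hget, eL, eR]
            by_cases hLR : PySem.Str.len (segs[i+1]'hiR) ≤ PySem.Str.len (segs[i-1]'(by omega))
            · -- merge right (left neighbour not strictly smaller)
              rw [if_neg (show ¬ PySem.Str.len (segs[i-1]'(by omega)) < PySem.Str.len (segs[i+1]'hiR) by omega)]
              try rw [if_neg (show ¬ (1 : Int) = -1 by norm_num)]
              try dsimp only
              try simp only [hc1, hget, eR]
              try simp only [PySem.List.pySetD_natCast, PySem.List.pop?_natCast, List.length_set, hiR]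
              have hne' := merged_ne_nil segs i (i+1) (segs[i] ++ " " ++ segs[i+1]) hcont.2
              obtain ⟨⟨ms', mi'⟩, hseg'⟩ := min_segment_some _ hne'
              simp only [hseg']
              have hsw : sweepB segs m i =
                  sweepB ((segs.set i (segs[i] ++ " " ++ segs[i+1])).eraseIdx (i+1)) m (i+1) := by
                rw [sweepB, dif_pos hcont, if_neg hBskip,
                  dif_pos (Or.inr ⟨hiR, by rw [hc1, em2, eL, eR]; exact hLR⟩)]
                simp only [hget, eR, hc1]
              rw [hsw] at hfb ⊢
              have hlm := length_merge segs i (i+1) (segs[i] ++ " " ++ segs[i+1]) hiR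
              have hvlen : m < PySem.Str.len (segs[i] ++ " " ++ segs[i+1]) := by
                have h0 := hlb i hcont.1
                have h1' := hlb (i+1) hiR
                have hnn := str_len_nonneg (segs[i])
                rw [len_join]
                omega
              refine ihμ _ m (i+1) fa' fb ms' mi' ?_ hne' ?_ ?_ ?_ hfb hml
                (inv_merge_pre segs m i _ hiR hvlen (fun j hj hji => hpre j hj (by omega)))
                (inv_merge_lb segs m i _ hiR (by omega) hlb)
                (Or.inl (by omega)) hseg'
              all_goals omega
            · -- merge left (left neighbour strictly smaller)
              rw [if_pos (show PySem.Str.len (segs[i-1]'(by omega)) < PySem.Str.len (segs[i+1]'hiR) by omega)]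
              try rw [if_pos (show (-1 : Int) = -1 from rfl)]
              try dsimp only
              try simp only [em1, em2, hget, eL]
              try simp only [PySem.List.pySetD_natCast, PySem.List.pop?_natCast, List.length_set, hcont.1]
              have heq : i - 1 + 1 = i := by omega
              have hne' := merged_ne_nil segs (i-1) i (segs[i-1] ++ " " ++ segs[i]) hcont.2
              obtain ⟨⟨ms', mi'⟩, hseg'⟩ := min_segment_some _ hne'
              simp only [hseg']
              have hsw : sweepB segs m i =
                  sweepB ((segs.set (i-1) (segs[i-1] ++ " " ++ segs[i])).eraseIdx i) m i := by
                rw [sweepB, dif_pos hcont, if_neg hBskip,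
                  dif_neg (by
                    rintro (h0 | ⟨h2, hcmp⟩)
                    · exact hi0 h0
                    · rw [hc1, em2, eL, eR] at hcmp
                      omega)]
                simp only [hget, em2, eL]
              rw [hsw] at hfb ⊢
              have hab : (i - 1) + 1 < segs.length := by omega
              have hlm := length_merge segs (i-1) ((i-1)+1) (segs[i-1] ++ " " ++ segs[i]) hab
              rw [heq] at hlm
              have hvlen : m < PySem.Str.len (segs[i-1] ++ " " ++ segs[i]) := by
                have h0 := hlb (i-1) (by omega)
                have h1' := hlb i hcont.1
                have hnn := str_len_nonneg (segs[i-1])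
                rw [len_join]
                omega
              have hpre' := inv_merge_pre segs m (i-1) (segs[i-1] ++ " " ++ segs[i]) hab hvlen
                (fun j hj hji => hpre j hj (by omega))
              have hlb' := inv_merge_lb segs m (i-1) (segs[i-1] ++ " " ++ segs[i]) hab (by omega) hlb
              rw [heq] at hpre' hlb'
              refine ihμ _ m i fa' fb ms' mi' ?_ hne' ?_ ?_ ?_ hfb hml
                (fun j hj hji => hpre' j hj (by omega)) hlb' (Or.inl (by omega)) hseg'
              all_goals omega

-- Outer round equivalence, by induction on the segment count
theorem main_eq : ∀ (N : Nat) (segs : List String) (m min_len : Int) (fa fb : Nat) (ms : String) (mi : Int),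
    segs.length ≤ N → segs ≠ [] → segs.length ≤ fa → segs.length ≤ fb →
    PySem.List.min? (segs.map PySem.Str.len) (fun x => x) = some m →
    min_segment segs = some (ms, mi) →
    mergeLoopA fa segs ms mi min_len = loopB fb segs m min_len := by
  intro N
  induction N with
  | zero =>
    intro segs m min_len fa fb ms mi hN hne _ _ _ _
    exact absurd (List.length_eq_zero_iff.mp (by omega)) hne
  | succ N ih =>
    intro segs m min_len fa fb ms mi hN hne hfa hfb hmin hseg
    have h1 : 0 < segs.length := List.length_pos_of_ne_nil hne
    obtain ⟨p, hfm0⟩ : ∃ p, firstMin (segs.map PySem.Str.len) = some p := by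
      cases hl : firstMin (segs.map PySem.Str.len) with
      | none =>
        rw [firstMin_eq_none_iff, List.map_eq_nil_iff] at hl
        exact absurd hl hne
      | some p => exact ⟨p, rfl⟩
    obtain ⟨i0, m0⟩ := p
    have hm0 : m0 = m := by
      have := firstMin_min? _ _ _ hfm0
      rw [hmin] at this
      exact (Option.some.injEq _ _ ▸ this).symm ▸ rfl
    subst hm0
    obtain ⟨hseg', hlen'⟩ := min_segment_eq segs hne i0 m0 hfm0
    rw [hseg] at hseg'
    simp only [Option.some.injEq, Prod.mk.injEq] at hseg'
    obtain ⟨hms, hmi⟩ := hseg'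
    obtain ⟨fa', rfl⟩ : ∃ fa', fa = fa' + 1 := ⟨fa - 1, by omega⟩
    obtain ⟨fb', rfl⟩ : ∃ fb', fb = fb' + 1 := ⟨fb - 1, by omega⟩
    obtain ⟨hi0, hv0⟩ := firstMin_getElem _ _ _ hfm0
    rw [List.getElem_map] at hv0
    rw [List.length_map] at hi0
    by_cases hc : m0 < min_len ∧ 1 < segs.length
    · have hstep : loopB (fb' + 1) segs m0 min_len =
          (match PySem.List.min? ((sweepB segs m0 0).map PySem.Str.len) (fun x => x) with
           | none => sweepB segs m0 0
           | some m' => loopB fb' (sweepB segs m0 0) m' min_len) := by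
        simp only [loopB]
        rw [if_pos hc]
      rw [hstep]
      have hshrink : (sweepB segs m0 0).length < segs.length :=
        sweep_shrinks segs m0 0 hc.2 ⟨i0, hi0, by omega, hv0⟩
      apply sweep_sim min_len N (fun s mm fa fb ms mi => ih s mm min_len fa fb ms mi)
        (2 * segs.length) segs m0 0 (fa' + 1) fb' ms mi
        (by omega) hne (by omega) (by omega) (by omega) (by omega) hc.1
        (fun j hj hji => absurd hji (by omega)) ?_ (Or.inr ⟨i0, hi0, by omega, hv0⟩) hseg
      intro j hj
      have hmem : PySem.Str.len segs[j] ∈ segs.map PySem.Str.len := by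
        rw [← List.getElem_map (f := PySem.Str.len) (h := by simpa using hj)]
        exact List.getElem_mem _
      simpa using PySem.List.min?_isMin hmin _ hmem
    · simp only [mergeLoopA, loopB]
      rw [if_neg (by rw [hms, hlen']; exact hc), if_neg hc]

-- ===== VERDICT (by name: the statement is the Claim_ definition above) =====
theorem merge_vocab_str_spec : Claim_equal_merge_vocab_str := by
  intro vocab_str min_len _ hpre
  unfold Spec_merge_vocab_str
  simp only [merge_vocab_str, merge_vocab_str_alt, List.map_id']
  obtain ⟨⟨ms, mi⟩, hseg⟩ := min_segment_some vocab_str hpre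
  obtain ⟨m, hmin⟩ := min?_lens_some vocab_str hpre
  simp only [hseg, hmin]
  exact main_eq vocab_str.length vocab_str m min_len vocab_str.length vocab_str.length ms mi
    le_rfl hpre le_rfl le_rfl hmin hseg
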